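-- pv_equiv track=rewrite | github.com/yufarui/minilm | src/dataset/pre_train_dataset.py | _build_token_stream
-- ===== SOURCE A (Python) =====
-- def _build_token_stream(doc_token_ids: list[list[int]], sep_token_id: int) -> list[int]:
--     """所有文档 token 首尾相接，相邻文档之间只插一个分隔符（不占文档前导）。"""
--     stream: list[int] = []
--     first = True
--     for ids in doc_token_ids:
--         if not ids:
--             continue
--         if not first:
--             stream.append(sep_token_id)
--         stream.extend(ids)
--         first = False
--     return stream
-- ===== SOURCE B (Python) =====
-- def _build_token_stream(doc_token_ids: list[list[int]], sep_token_id: int) -> list[int]: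
--     """Preallocate the whole output as separators, then slice-assign each
--     non-empty doc at its computed offset; the separator slots between docs
--     are simply the untouched cells of the buffer."""
--     nonempty = [ids for ids in doc_token_ids if ids]
--     if not nonempty:
--         return []
--     out = [sep_token_id] * (sum(len(ids) for ids in nonempty) + len(nonempty) - 1)
--     pos = 0
--     for ids in nonempty:
--         out[pos:pos + len(ids)] = ids
--         pos += len(ids) + 1
--     return out
-- ===== Notes on version B (the rewrite author's own statement) =====
-- stated objective: alternative
-- what changed: Instead of growing a list with a first-flag branch, B preallocates the exact-size output filled with separators and slice-assigns each non-empty doc at its computed offset, leaving the untouched cells as the separators.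
import Mathlib
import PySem

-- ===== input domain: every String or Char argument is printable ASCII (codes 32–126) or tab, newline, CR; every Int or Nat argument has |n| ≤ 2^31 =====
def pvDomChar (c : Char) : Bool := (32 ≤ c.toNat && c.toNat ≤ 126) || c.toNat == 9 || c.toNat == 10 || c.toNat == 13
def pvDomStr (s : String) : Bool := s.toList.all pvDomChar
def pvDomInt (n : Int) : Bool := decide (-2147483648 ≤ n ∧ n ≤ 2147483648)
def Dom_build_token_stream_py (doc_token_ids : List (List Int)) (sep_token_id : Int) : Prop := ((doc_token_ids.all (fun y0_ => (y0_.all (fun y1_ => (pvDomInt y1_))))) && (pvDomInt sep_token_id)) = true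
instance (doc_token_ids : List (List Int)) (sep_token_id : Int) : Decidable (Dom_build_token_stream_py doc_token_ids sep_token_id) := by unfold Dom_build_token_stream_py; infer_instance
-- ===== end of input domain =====

-- B replaces A's grow-and-branch loop by a preallocated separator-filled buffer with slice-assignment at computed offsets. Objective: alternative.


-- ===== PORT A =====
-- state = (stream, first); branches in A's order: skip empty ids, append sep unless first, extend, clear first
def build_token_stream_py (doc_token_ids : List (List Int)) (sep_token_id : Int) : List Int :=
  (doc_token_ids.foldl
    (fun (st : List Int × Bool) ids =>
      if ids = [] then st
      else ((if st.2 then st.1 else st.1 ++ [sep_token_id]) ++ ids, false))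
    ([], true)).1

-- ===== PORT B =====
-- prefilter; preallocate sum(len)+k-1 separators; the loop slice-assigns ids at offset pos
-- (out[pos:pos+len(ids)] = ids, same length, ported exactly as take/++/drop) and advances pos.
def build_token_stream_py_alt (doc_token_ids : List (List Int)) (sep_token_id : Int) : List Int :=
  let nonempty := doc_token_ids.filter (fun ids => ids ≠ [])
  if nonempty = [] then []
  else
    (nonempty.foldl
      (fun (st : List Int × Nat) ids =>
        (st.1.take st.2 ++ ids ++ st.1.drop (st.2 + ids.length), st.2 + ids.length + 1))
      (List.replicate ((nonempty.map List.length).sum + nonempty.length - 1) sep_token_id, 0)).1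

-- ===== PRECONDITION & SPEC =====
def Spec_build_token_stream_py (doc_token_ids : List (List Int)) (sep_token_id : Int) (out : List Int) : Prop := out = build_token_stream_py_alt doc_token_ids sep_token_id
instance (doc_token_ids : List (List Int)) (sep_token_id : Int) (out : List Int) : Decidable (Spec_build_token_stream_py doc_token_ids sep_token_id out) := by unfold Spec_build_token_stream_py; infer_instance

-- ===== CLAIM (what is proved, stated in full; the proofs are below) =====
def Claim_equal_build_token_stream_py : Prop := ∀ (doc_token_ids : List (List Int)) (sep_token_id : Int), Dom_build_token_stream_py doc_token_ids sep_token_id → Spec_build_token_stream_py doc_token_ids sep_token_id (build_token_stream_py doc_token_ids sep_token_id)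

-- ===== LEMMAS AND PROOFS =====

-- the common specification: docs joined with single separators
def pvJoinSep (sep : Int) : List (List Int) → List Int
  | [] => []
  | [x] => x
  | x :: y :: rest => x ++ sep :: pvJoinSep sep (y :: rest)

theorem pvJoinSep_cons (sep : Int) (x : List Int) (m : List (List Int)) :
    pvJoinSep sep (x :: m) = x ++ m.flatMap (fun ids => sep :: ids) := by
  induction m generalizing x with
  | nil => simp [pvJoinSep]
  | cons y r ih => simp [pvJoinSep, ih y]

-- A side: once first = false, the fold appends sep::ids for each non-empty doc
theorem bts_A_false (sep : Int) (l : List (List Int)) (acc : List Int) :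
    (l.foldl
      (fun (st : List Int × Bool) ids =>
        if ids = [] then st
        else ((if st.2 then st.1 else st.1 ++ [sep]) ++ ids, false))
      (acc, false)).1
      = acc ++ (l.filter (fun ids => ids ≠ [])).flatMap (fun ids => sep :: ids) := by
  induction l generalizing acc with
  | nil => simp
  | cons x xs ih =>
    by_cases hx : x = [] <;> simp [List.foldl_cons, hx, ih]

theorem bts_A_join (sep : Int) (l : List (List Int)) :
    build_token_stream_py l sep = pvJoinSep sep (l.filter (fun ids => ids ≠ [])) := by
  unfold build_token_stream_py
  induction l with
  | nil => rfl
  | cons x xs ih =>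
    by_cases hx : x = []
    · simpa [List.foldl_cons, hx] using ih
    · simp [List.foldl_cons, hx, bts_A_false, pvJoinSep_cons]

-- B side: the fold over a nonempty list, started on P followed by the remaining
-- separator buffer (of size sum(len)+k-1) at position |P|, writes P ++ pvJoinSep
theorem bts_B_inv (sep : Int) (l : List (List Int)) (hl : l ≠ []) (P : List Int) :
    (l.foldl
      (fun (st : List Int × Nat) ids =>
        (st.1.take st.2 ++ ids ++ st.1.drop (st.2 + ids.length), st.2 + ids.length + 1))
      (P ++ List.replicate ((l.map List.length).sum + l.length - 1) sep, P.length)).1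
      = P ++ pvJoinSep sep l := by
  induction l generalizing P with
  | nil => exact absurd rfl hl
  | cons x xs ih =>
    cases xs with
    | nil =>
      simp [List.foldl_cons, pvJoinSep]
    | cons y r =>
      have hlen : (List.map List.length (x :: y :: r)).sum + (x :: y :: r).length - 1
          = x.length + (((List.map List.length (y :: r)).sum + (y :: r).length - 1) + 1) := by
        simp [List.length_cons]; omega
      have hrep : List.replicate ((List.map List.length (x :: y :: r)).sum + (x :: y :: r).length - 1) sep
          = List.replicate x.length sep ++ sep :: List.replicate ((List.map List.length (y :: r)).sum + (y :: r).length - 1) sep := by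
        rw [hlen, List.replicate_add, List.replicate_succ]
      have h1 : (P ++ List.replicate ((List.map List.length (x :: y :: r)).sum + (x :: y :: r).length - 1) sep).take P.length ++ x ++
            (P ++ List.replicate ((List.map List.length (x :: y :: r)).sum + (x :: y :: r).length - 1) sep).drop (P.length + x.length)
          = (P ++ x ++ [sep]) ++ List.replicate ((List.map List.length (y :: r)).sum + (y :: r).length - 1) sep := by
        rw [hrep, List.take_left]
        rw [show P.length + x.length = (P ++ List.replicate x.length sep).length by simp]
        rw [List.append_assoc P, ← List.append_assoc P (List.replicate x.length sep), List.drop_left]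
        simp
      rw [List.foldl_cons]
      dsimp only
      rw [h1, show P.length + x.length + 1 = (P ++ x ++ [sep]).length by simp [Nat.add_assoc],
        ih (by simp) (P ++ x ++ [sep])]
      simp [pvJoinSep]

theorem bts_main (d : List (List Int)) (sep : Int) :
    build_token_stream_py d sep = build_token_stream_py_alt d sep := by
  unfold build_token_stream_py_alt
  rw [bts_A_join]
  by_cases h : d.filter (fun ids => ids ≠ []) = []
  · rw [if_pos h, h]; rfl
  · rw [if_neg h]
    simpa using (bts_B_inv sep (d.filter (fun ids => ids ≠ [])) h []).symm

-- ===== VERDICT (by name: the statement is the Claim_ definition above) =====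
theorem build_token_stream_py_spec : Claim_equal_build_token_stream_py := by
  intro d s _
  unfold Spec_build_token_stream_py
  exact bts_main d s
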